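-- pv_equiv track=rewrite | github.com/PabloGonzalez278/ADAProjectBogotech | tsp-red-vial/backend/dominio/tsp_held_karp.py | generar_subconjuntos
-- ===== SOURCE A (Python) =====
-- def generar_subconjuntos(n: int, size: int):
--     """
--     Genera todos los subconjuntos de tamaño dado usando representación de bits.
--     Los subconjuntos representan conjuntos de ciudades visitadas.
--
--     Args:
--         n: Número total de elementos
--         size: Tamaño de los subconjuntos
--
--     Yields:
--         Enteros que representan subconjuntos en formato bitmask
--     """
--     subset = (1 << size) - 1
--     limit = 1 << n
--
--     while subset < limit:
--         if bin(subset).count('1') == size and not (subset & 1):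
--             yield subset
--
--         c = subset & -subset
--         r = subset + c
--         subset = (((r ^ subset) >> 2) // c) | r
-- ===== SOURCE B (Python) =====
-- def generar_subconjuntos(n: int, size: int):
--     """Recursive colex enumeration: all size-subsets of bit positions 1..n-1,
--     largest position outermost, so masks come out in increasing numeric order
--     with no bitmask walk, no popcount check and no evenness filter."""
--     def colex(top: int, k: int):
--         # masks with exactly k set bits among positions 1..top, ascending
--         if k == 0:
--             yield 0
--             return
--         for hi in range(k, top + 1):
--             for rest in colex(hi - 1, k - 1):
--                 yield rest | (1 << hi)
--     yield from colex(n - 1, size)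
-- ===== Notes on version B (the rewrite author's own statement) =====
-- stated objective: alternative
-- what changed: B replaces A's Gosper-hack bitmask walk with filter (popcount string check + evenness test) by a recursive colex enumeration of size-subsets of bit positions 1..n-1 (largest position outermost), which emits exactly the wanted masks in the same ascending order and never visits a rejected mask.
import Mathlib
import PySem

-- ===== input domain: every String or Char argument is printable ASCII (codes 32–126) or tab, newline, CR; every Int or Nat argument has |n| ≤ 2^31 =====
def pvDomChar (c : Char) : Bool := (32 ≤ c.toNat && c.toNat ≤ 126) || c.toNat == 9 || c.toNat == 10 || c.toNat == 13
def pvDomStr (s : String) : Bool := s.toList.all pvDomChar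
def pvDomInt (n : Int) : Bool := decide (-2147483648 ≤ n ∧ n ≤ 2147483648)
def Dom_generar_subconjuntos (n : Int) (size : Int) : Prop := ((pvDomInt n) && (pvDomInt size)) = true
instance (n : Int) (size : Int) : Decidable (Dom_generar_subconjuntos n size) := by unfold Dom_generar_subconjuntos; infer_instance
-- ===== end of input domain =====

-- B replaces A's Gosper-hack walk-and-filter by a recursive colex enumeration of the
-- size-subsets of bit positions 1..n-1 (largest position outermost), emitting the same
-- masks in the same ascending order (objective: alternative algorithm).


-- ===== PORT A =====
-- A's loop tail: c = subset & -subset; r = subset + c; subset = (((r ^ subset) >> 2) // c) | r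
def gstepA (s : Int) : Int :=
  let c := PySem.Int.band s (-s)
  let r := s + c
  PySem.Int.bor (PySem.Int.floordiv ((PySem.Int.bxor r s) >>> (2 : Nat)) c) r

-- A's while loop.  `bin(subset).count('1')` is ported as PySem.Int.bitCount (bin renders the
-- binary digits of |subset|, so its count of '1' characters is exactly int.bit_count, for every int).
-- The dite on `s < gstepA s` is a termination guard only: on every state reached under Pre_ the
-- Gosper step strictly increases the state (proved below), so the guard never alters the result.
def loopA (size limit s : Int) : List Int :=
  if _h : s < limit then
    (if (PySem.Int.bitCount s : Int) = size ∧ PySem.Int.band s 1 = 0 then [s] else []) ++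
      (if _h2 : s < gstepA s then loopA size limit (gstepA s) else [])
  else []
termination_by (limit - s).toNat
decreasing_by omega

-- `1 << n`, `1 << size`: exact for n, size ≥ 0 (Pre_); Python raises ValueError on a negative shift.
def generar_subconjuntos (n : Int) (size : Int) : List Int :=
  loopA size ((1 : Int) <<< n.toNat) (((1 : Int) <<< size.toNat) - 1)

-- ===== PORT B =====
-- B's recursive generator colex(top, k): all masks with k set bits among positions 1..top,
-- in ascending numeric order, largest position (the outer loop variable hi) outermost.
-- The dite on (k-1).toNat < k.toNat is a termination guard only: it holds whenever k ≥ 1,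
-- i.e. on every call the Python generator makes under Pre_ (for negative k Python recurses
-- forever; those inputs are outside Pre_).
def colexB (top : Int) (k : Int) : List Int :=
  if k = 0 then [0]
  else
    (PySem.List.pyRange k (top + 1) 1).flatMap (fun hi =>
      if _h : (k - 1).toNat < k.toNat then
        (colexB (hi - 1) (k - 1)).map (fun rest => PySem.Int.bor rest ((1 : Int) <<< hi.toNat))
      else [])
termination_by k.toNat

def generar_subconjuntos_alt (n : Int) (size : Int) : List Int :=
  colexB (n - 1) size

-- ===== PRECONDITION & SPEC =====
-- Pre_ excludes exactly the raising inputs: n < 0 or size < 0 raise ValueError (negative shift)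
-- in A (and B recurses without bound for size < 0), and size = 0 makes A raise
-- ZeroDivisionError at the first Gosper step.
def Pre_generar_subconjuntos (n : Int) (size : Int) : Prop := 0 ≤ n ∧ 1 ≤ size
instance (n : Int) (size : Int) : Decidable (Pre_generar_subconjuntos n size) := by
  unfold Pre_generar_subconjuntos; infer_instance
def pvWitness_generar_subconjuntos : Int × Int := (4, 2)

def Spec_generar_subconjuntos (n : Int) (size : Int) (out : List Int) : Prop := out = generar_subconjuntos_alt n size
instance (n : Int) (size : Int) (out : List Int) : Decidable (Spec_generar_subconjuntos n size out) := by unfold Spec_generar_subconjuntos; infer_instance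

-- ===== CLAIM (what is proved, stated in full; the proofs are below) =====
def Claim_equal_generar_subconjuntos : Prop := ∀ (n : Int) (size : Int), Dom_generar_subconjuntos n size → Pre_generar_subconjuntos n size → Spec_generar_subconjuntos n size (generar_subconjuntos n size)

-- ===== LEMMAS AND PROOFS =====

-- The canonical list both ports are proved equal to: the masks m ∈ [lo, hi) with
-- popcount m = k and m even, in ascending order.
def canonF (k lo hi : Nat) : List Int :=
  if _h : lo < hi then
    (if PySem.Int.bitCount ((lo : Nat) : Int) = k ∧ lo % 2 = 0 then [((lo : Nat) : Int)] else [])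
      ++ canonF k (lo + 1) hi
  else []
termination_by hi - lo

theorem canon_nil (k lo hi : Nat) (h : ¬ lo < hi) : canonF k lo hi = [] := by
  rw [canonF]; simp [h]

theorem canon_cons (k lo hi : Nat) (h : lo < hi) : canonF k lo hi =
    (if PySem.Int.bitCount ((lo : Nat) : Int) = k ∧ lo % 2 = 0 then [((lo : Nat) : Int)] else [])
      ++ canonF k (lo + 1) hi := by
  rw [canonF, dif_pos h]

theorem canon_skip (k : Nat) : ∀ d lo hi lo', lo' - lo ≤ d → lo ≤ lo' →
    (∀ m, lo ≤ m → m < lo' → PySem.Int.bitCount ((m : Nat) : Int) ≠ k) →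
    canonF k lo hi = canonF k lo' hi := by
  intro d
  induction d with
  | zero => intro lo hi lo' hd hle _; have : lo = lo' := by omega
            rw [this]
  | succ d ih =>
    intro lo hi lo' hd hle hfail
    rcases Nat.eq_or_lt_of_le hle with h | h
    · rw [h]
    · by_cases hlo : lo < hi
      · rw [canon_cons k lo hi hlo, if_neg (by
          rintro ⟨hb, _⟩; exact hfail lo le_rfl h hb)]
        simp only [List.nil_append]
        exact ih (lo+1) hi lo' (by omega) (by omega) (fun m hm1 hm2 => hfail m (by omega) hm2)
      · rw [canon_nil k lo hi hlo, canon_nil k lo' hi (by omega)]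

theorem canon_split (k : Nat) : ∀ d lo mid hi, mid - lo ≤ d → lo ≤ mid → mid ≤ hi →
    canonF k lo hi = canonF k lo mid ++ canonF k mid hi := by
  intro d
  induction d with
  | zero => intro lo mid hi hd h1 h2
            have : lo = mid := by omega
            subst this; rw [canon_nil k lo lo (by omega)]; simp
  | succ d ih =>
    intro lo mid hi hd h1 h2
    rcases Nat.eq_or_lt_of_le h1 with h | h
    · subst h; rw [canon_nil k lo lo (by omega)]; simp
    · rw [canon_cons k lo hi (by omega), ih (lo+1) mid hi (by omega) (by omega) h2,
          canon_cons k lo mid (by omega)]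
      simp [List.append_assoc]

theorem canon_mem (k : Nat) : ∀ d lo hi, hi - lo ≤ d → ∀ (x : Int), x ∈ canonF k lo hi →
    ∃ t : Nat, x = (t : Int) ∧ lo ≤ t ∧ t < hi := by
  intro d
  induction d with
  | zero => intro lo hi hd x hx
            rw [canon_nil k lo hi (by omega)] at hx; simp at hx
  | succ d ih =>
    intro lo hi hd x hx
    by_cases hlo : lo < hi
    · rw [canon_cons k lo hi hlo] at hx
      rcases List.mem_append.1 hx with h | h
      · refine ⟨lo, ?_, le_rfl, hlo⟩
        split at h <;> simp at h
        exact h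
      · obtain ⟨t, ht, h1, h2⟩ := ih (lo+1) hi (by omega) x h
        exact ⟨t, ht, by omega, h2⟩
    · rw [canon_nil k lo hi hlo] at hx; simp at hx

-- ---- bit-count toolkit ----
theorem pv_bitCount_halve (b : Nat) :
    PySem.Int.bitCount (b : Int) = b % 2 + PySem.Int.bitCount ((b / 2 : Nat) : Int) := by
  rcases Nat.eq_zero_or_pos b with h | h
  · subst h; simp [PySem.Int.bitCount_zero]
  · exact PySem.Int.bitCount_natCast h

theorem pv_bitCount_mul_pow_add (m : Nat) : ∀ a b : Nat, b < 2 ^ m →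
    PySem.Int.bitCount ((a * 2 ^ m + b : Nat) : Int) =
      PySem.Int.bitCount (a : Int) + PySem.Int.bitCount (b : Int) := by
  induction m with
  | zero =>
    intro a b hb
    interval_cases b
    simp [PySem.Int.bitCount_zero]
  | succ m ih =>
    intro a b hb
    have hsplit : (a * 2 ^ (m + 1) + b) % 2 = b % 2 ∧ (a * 2 ^ (m + 1) + b) / 2 = a * 2 ^ m + b / 2 := by
      have h2 : a * 2 ^ (m + 1) = 2 * (a * 2 ^ m) := by ring
      constructor <;> omega
    rw [pv_bitCount_halve (a * 2 ^ (m + 1) + b), hsplit.1, hsplit.2,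
        ih a (b / 2) (by omega), pv_bitCount_halve b]
    omega

theorem pv_bitCount_pow_sub_one (j : Nat) : PySem.Int.bitCount ((2 ^ j - 1 : Nat) : Int) = j := by
  induction j with
  | zero => simp [PySem.Int.bitCount_zero]
  | succ j ih =>
    have h1 : 1 ≤ 2 ^ j := Nat.one_le_two_pow
    have hm : (2 ^ (j + 1) - 1) % 2 = 1 := by
      have : 2 ^ (j + 1) = 2 * 2 ^ j := by ring
      omega
    have hd : (2 ^ (j + 1) - 1) / 2 = 2 ^ j - 1 := by
      have : 2 ^ (j + 1) = 2 * 2 ^ j := by ring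
      omega
    rw [pv_bitCount_halve, hm, hd, ih]
    omega

theorem pv_bc_succ_even (a : Nat) (ha : a % 2 = 0) :
    PySem.Int.bitCount ((a + 1 : Nat) : Int) = PySem.Int.bitCount (a : Int) + 1 := by
  have hdiv : (a + 1) / 2 = a / 2 := by omega
  rw [pv_bitCount_halve (a + 1), pv_bitCount_halve a, hdiv]
  omega

-- smallest number with a given popcount
theorem pv_bc_min : ∀ x : Nat, 2 ^ (PySem.Int.bitCount (x : Int)) - 1 ≤ x := by
  intro x
  induction x using Nat.strong_induction_on with
  | _ x ih =>
    rcases Nat.eq_zero_or_pos x with h | h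
    · subst h; simp [PySem.Int.bitCount_zero]
    · rw [pv_bitCount_halve x]
      have ihx := ih (x / 2) (by omega)
      rcases Nat.mod_two_eq_zero_or_one x with he | ho
      · rw [he]; simp only [Nat.zero_add]; omega
      · rw [ho]
        have e : 2 ^ (1 + PySem.Int.bitCount ((x / 2 : Nat) : Int))
            = 2 * 2 ^ (PySem.Int.bitCount ((x / 2 : Nat) : Int)) := by
          rw [pow_add, pow_one]
        omega

-- largest number with a given popcount below a power of two
theorem pv_bc_max : ∀ N x : Nat, x < 2 ^ N → PySem.Int.bitCount (x : Int) ≤ N ∧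
    x ≤ (2 ^ (PySem.Int.bitCount (x : Int)) - 1) * 2 ^ (N - PySem.Int.bitCount (x : Int)) := by
  intro N
  induction N with
  | zero =>
    intro x hx
    interval_cases x
    simp [PySem.Int.bitCount_zero]
  | succ N ih =>
    intro x hx
    rcases Nat.eq_zero_or_pos x with h | h
    · subst h; simp [PySem.Int.bitCount_zero]
    · obtain ⟨hbN, hble⟩ := ih (x / 2) (by omega)
      rw [pv_bitCount_halve x]
      have hA : 1 ≤ 2 ^ (PySem.Int.bitCount ((x / 2 : Nat) : Int)) := Nat.one_le_two_pow
      have hB : 1 ≤ 2 ^ (N - PySem.Int.bitCount ((x / 2 : Nat) : Int)) := Nat.one_le_two_pow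
      rcases Nat.mod_two_eq_zero_or_one x with he | ho
      · rw [he]; simp only [Nat.zero_add]
        refine ⟨by omega, ?_⟩
        have h2 : x ≤ 2 * ((2 ^ (PySem.Int.bitCount ((x / 2 : Nat) : Int)) - 1)
            * 2 ^ (N - PySem.Int.bitCount ((x / 2 : Nat) : Int))) := by omega
        calc x ≤ 2 * ((2 ^ (PySem.Int.bitCount ((x / 2 : Nat) : Int)) - 1)
                  * 2 ^ (N - PySem.Int.bitCount ((x / 2 : Nat) : Int))) := h2
          _ = (2 ^ (PySem.Int.bitCount ((x / 2 : Nat) : Int)) - 1)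
                  * 2 ^ (N + 1 - PySem.Int.bitCount ((x / 2 : Nat) : Int)) := by
                rw [show N + 1 - PySem.Int.bitCount ((x / 2 : Nat) : Int)
                    = (N - PySem.Int.bitCount ((x / 2 : Nat) : Int)) + 1 from by omega, pow_succ]
                ring
      · rw [ho]
        refine ⟨by omega, ?_⟩
        set b := PySem.Int.bitCount ((x / 2 : Nat) : Int) with hb
        have e0 : N + 1 - (1 + b) = N - b := by omega
        have e1 : 2 ^ (1 + b) = 2 * 2 ^ b := by rw [pow_add, pow_one]
        rw [e0, e1]
        have e2 : (2 * 2 ^ b - 1) * 2 ^ (N - b) = 2 * 2 ^ b * 2 ^ (N - b) - 1 * 2 ^ (N - b) :=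
          Nat.sub_mul _ _ _
        have e3 : (2 ^ b - 1) * 2 ^ (N - b) = 2 ^ b * 2 ^ (N - b) - 1 * 2 ^ (N - b) :=
          Nat.sub_mul _ _ _
        have e4 : 2 * 2 ^ b * 2 ^ (N - b) = 2 * (2 ^ b * 2 ^ (N - b)) := by ring
        have hBP : 2 ^ (N - b) ≤ 2 ^ b * 2 ^ (N - b) := Nat.le_mul_of_pos_left _ (by omega)
        rw [e3] at hble
        omega

theorem pv_bc_eq_zero (m : Nat) (h : PySem.Int.bitCount ((m : Nat) : Int) = 0) : m = 0 := by
  have := (pv_bc_max m m (Nat.lt_two_pow_self)).2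
  rw [h] at this
  simpa using this

-- ---- A-side: closed form of the Gosper step ----
theorem pv_tb_pred_odd (u : Nat) (hu : u % 2 = 1) (i : Nat) :
    (u - 1).testBit i = if i = 0 then false else u.testBit i := by
  cases i with
  | zero => rw [if_pos rfl, Nat.testBit_zero]; simp; omega
  | succ d => rw [if_neg (by omega), Nat.testBit_add_one, Nat.testBit_add_one]
              congr 1; omega

theorem pv_tb_succ_even (a : Nat) (ha : a % 2 = 0) (i : Nat) :
    (a + 1).testBit i = if i = 0 then true else a.testBit i := by
  cases i with
  | zero => rw [if_pos rfl, Nat.testBit_zero]; simp; omega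
  | succ d => rw [if_neg (by omega), Nat.testBit_add_one, Nat.testBit_add_one]
              congr 1; omega

theorem pv_land (u p : Nat) (hu : u % 2 = 1) :
    (2 ^ p * u) &&& (2 ^ p * u - 1) = 2 ^ p * (u - 1) := by
  have hp : 1 ≤ 2 ^ p := Nat.one_le_two_pow
  obtain ⟨v, rfl⟩ : ∃ v, u = v + 1 := ⟨u - 1, by omega⟩
  have h1 : 2 ^ p * (v + 1) - 1 = 2 ^ p * v + (2 ^ p - 1) := by
    rw [Nat.mul_add, Nat.mul_one]; omega
  apply Nat.eq_of_testBit_eq; intro i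
  rw [Nat.testBit_land, h1, Nat.testBit_two_pow_mul_add _ (by omega),
      Nat.testBit_two_pow_mul, Nat.testBit_two_pow_mul]
  rcases lt_trichotomy i p with h | h | h
  · simp [h, Nat.not_le.2 h]
  · subst h
    simp only [if_neg (lt_irrefl i), ge_iff_le, le_refl, decide_true, Bool.true_and,
      Nat.sub_self]
    have h0 : (v + 1).testBit 0 = true := by rw [Nat.testBit_zero]; simp; omega
    have h0' : (v + 1 - 1).testBit 0 = false := pv_tb_pred_odd _ hu 0 |>.trans (if_pos rfl)
    simp only [Nat.add_sub_cancel] at h0' ⊢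
    rw [h0]
    have : v.testBit 0 = false := by rw [Nat.testBit_zero]; simp; omega
    simp [this]
  · have hne : ¬ i < p := by omega
    have hge : p ≤ i := by omega
    have hpred := pv_tb_pred_odd (v + 1) hu (i - p)
    rw [if_neg (by omega : ¬ i - p = 0)] at hpred
    simp only [Nat.add_sub_cancel] at hpred
    simp [hne, hge, hpred]

theorem pv_band_neg (m : Nat) (h : 0 < m) :
    PySem.Int.band (m : Int) (-(m : Int)) = ((m - (m &&& (m - 1)) : Nat) : Int) := by
  unfold PySem.Int.band
  rw [if_pos (by omega : (0:Int) ≤ (m:Int)), if_neg (by omega)]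
  norm_num

theorem pv_c (u p : Nat) (hu : u % 2 = 1) :
    PySem.Int.band ((2 ^ p * u : Nat) : Int) (-((2 ^ p * u : Nat) : Int)) = ((2 ^ p : Nat) : Int) := by
  have hp : 1 ≤ 2 ^ p := Nat.one_le_two_pow
  have hu1 : 0 < u := by omega
  rw [pv_band_neg _ (by positivity), pv_land u p hu]
  congr 1
  have : 2 ^ p * (u - 1) + 2 ^ p = 2 ^ p * u := by
    rw [← Nat.mul_succ]; congr 1; omega
  omega

theorem pv_xor0 (a j : Nat) (ha : a % 2 = 0) (hj : 1 ≤ j) :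
    ((a + 1) * 2 ^ j) ^^^ (a * 2 ^ j + (2 ^ j - 1)) = 2 ^ (j + 1) - 1 := by
  apply Nat.eq_of_testBit_eq; intro i
  rw [Nat.testBit_xor, Nat.mul_comm (a + 1), Nat.mul_comm a,
      Nat.testBit_two_pow_mul, Nat.testBit_two_pow_mul_add _ (by
        have : 1 ≤ 2 ^ j := Nat.one_le_two_pow; omega),
      Nat.testBit_two_pow_sub_one]
  rcases lt_trichotomy i j with h | h | h
  · simp [h, Nat.not_le.2 h, Nat.testBit_two_pow_sub_one]
    omega
  · subst h
    have h1 : (a + 1).testBit 0 = true := (pv_tb_succ_even a ha 0).trans (if_pos rfl)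
    have h0 : a.testBit 0 = false := by rw [Nat.testBit_zero]; simp; omega
    simp [h1, h0]
  · have hsucc := pv_tb_succ_even a ha (i - j)
    rw [if_neg (by omega : ¬ i - j = 0)] at hsucc
    simp [Nat.not_lt.2 (le_of_lt h), le_of_lt h, hsucc]
    omega

theorem pv_or (b c m : Nat) (hb : b < 2 ^ m) : b ||| c * 2 ^ m = c * 2 ^ m + b := by
  apply Nat.eq_of_testBit_eq; intro i
  rw [Nat.testBit_lor, Nat.mul_comm c, Nat.testBit_two_pow_mul,
      Nat.testBit_two_pow_mul_add _ hb]
  by_cases h : i < m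
  · simp [h, Nat.not_le.2 h]
  · have hb' : b.testBit i = false :=
      Nat.testBit_eq_false_of_lt (lt_of_lt_of_le hb (Nat.pow_le_pow_right (by omega) (by omega)))
    simp [h, Nat.not_lt.1 h, hb']

theorem pv_div (j p : Nat) (hj : 1 ≤ j) :
    (2 ^ (j + 1) - 1) * 2 ^ p / 4 / 2 ^ p = 2 ^ (j - 1) - 1 := by
  have hp : 0 < 2 ^ p := pow_pos (by norm_num) _
  rw [Nat.div_div_eq_div_mul]
  have : (2 ^ (j + 1) - 1) * 2 ^ p / (4 * 2 ^ p) = (2 ^ (j + 1) - 1) / 4 := by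
    rw [Nat.mul_comm 4 (2 ^ p), Nat.mul_comm (2 ^ (j + 1) - 1) (2 ^ p),
        Nat.mul_div_mul_left _ _ hp]
  rw [this]
  have h2 : 2 ^ (j + 1) = 4 * 2 ^ (j - 1) := by
    have : j + 1 = 2 + (j - 1) := by omega
    rw [this, pow_add]; norm_num
  have h1 : 1 ≤ 2 ^ (j - 1) := Nat.one_le_two_pow
  have : 2 ^ (j + 1) - 1 = 4 * (2 ^ (j - 1) - 1) + 3 := by omega
  rw [this, Nat.mul_add_div (by omega)]
  omega

-- the Gosper step on a decomposed positive state
theorem pv_gstepA (a j p : Nat) (ha : a % 2 = 0) (hj : 1 ≤ j) :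
    gstepA ((a * 2 ^ (p + j) + (2 ^ j - 1) * 2 ^ p : Nat) : Int) =
      (((a + 1) * 2 ^ (p + j) + (2 ^ (j - 1) - 1) : Nat) : Int) := by
  have h1 : 1 ≤ 2 ^ j := Nat.one_le_two_pow
  have hu : (a * 2 ^ j + (2 ^ j - 1)) % 2 = 1 := by
    have h2j : 2 ^ j % 2 = 0 := by
      have : j = 1 + (j - 1) := by omega
      rw [this, pow_add]; simp [Nat.mul_mod_right]
    have h2a : a * 2 ^ j % 2 = 0 := by
      rw [Nat.mul_mod, h2j]; simp
    omega
  have hs : a * 2 ^ (p + j) + (2 ^ j - 1) * 2 ^ p = 2 ^ p * (a * 2 ^ j + (2 ^ j - 1)) := by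
    rw [pow_add]; ring
  have hr : 2 ^ p * (a * 2 ^ j + (2 ^ j - 1)) + 2 ^ p = (a + 1) * 2 ^ (p + j) := by
    rw [pow_add]
    have : a * 2 ^ j + (2 ^ j - 1) + 1 = (a + 1) * 2 ^ j := by
      rw [Nat.add_mul, Nat.one_mul]; omega
    calc 2 ^ p * (a * 2 ^ j + (2 ^ j - 1)) + 2 ^ p
        = 2 ^ p * (a * 2 ^ j + (2 ^ j - 1) + 1) := by ring
      _ = 2 ^ p * ((a + 1) * 2 ^ j) := by rw [this]
      _ = (a + 1) * (2 ^ p * 2 ^ j) := by ring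
  show PySem.Int.bor _ _ = _
  rw [hs, pv_c _ _ hu]
  have hcast : ((2 ^ p * (a * 2 ^ j + (2 ^ j - 1)) : Nat) : Int) + ((2 ^ p : Nat) : Int)
      = (((a + 1) * 2 ^ (p + j) : Nat) : Int) := by
    rw [← Nat.cast_add, hr]
  rw [hcast]
  rw [PySem.Int.bxor_natCast]
  have hxor : ((a + 1) * 2 ^ (p + j)) ^^^ (2 ^ p * (a * 2 ^ j + (2 ^ j - 1)))
      = (2 ^ (j + 1) - 1) * 2 ^ p := by
    have e1 : (a + 1) * 2 ^ (p + j) = ((a + 1) * 2 ^ j) <<< p := by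
      rw [Nat.shiftLeft_eq, pow_add]; ring
    have e2 : 2 ^ p * (a * 2 ^ j + (2 ^ j - 1)) = (a * 2 ^ j + (2 ^ j - 1)) <<< p := by
      rw [Nat.shiftLeft_eq]; ring
    rw [e1, e2, ← Nat.shiftLeft_xor_distrib, pv_xor0 a j ha hj, Nat.shiftLeft_eq]
  rw [hxor]
  have hshift : (((2 ^ (j + 1) - 1) * 2 ^ p : Nat) : Int) >>> (2 : Nat)
      = (((2 ^ (j + 1) - 1) * 2 ^ p / 4 : Nat) : Int) := by
    rw [← Int.natCast_shiftRight, Nat.shiftRight_eq_div_pow]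
  rw [hshift, PySem.Int.floordiv_natCast, pv_div j p hj, PySem.Int.bor_natCast]
  congr 1
  have hblt : 2 ^ (j - 1) - 1 < 2 ^ (p + j) := by
    have : 2 ^ (j - 1) ≤ 2 ^ (p + j) := Nat.pow_le_pow_right (by omega) (by omega)
    have h1' : 1 ≤ 2 ^ (j - 1) := Nat.one_le_two_pow
    omega
  rw [pv_or _ _ _ hblt]

theorem pv_lt_gstep (a j p : Nat) (_hj : 1 ≤ j) :
    a * 2 ^ (p + j) + (2 ^ j - 1) * 2 ^ p < (a + 1) * 2 ^ (p + j) + (2 ^ (j - 1) - 1) := by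
  have h1 : (2 ^ j - 1) * 2 ^ p < 2 ^ (p + j) := by
    have hp : 0 < 2 ^ p := pow_pos (by norm_num) _
    have h2 : 2 ^ j - 1 < 2 ^ j := by
      have : 1 ≤ 2 ^ j := Nat.one_le_two_pow; omega
    calc (2 ^ j - 1) * 2 ^ p < 2 ^ j * 2 ^ p := by exact (Nat.mul_lt_mul_right hp).mpr h2
      _ = 2 ^ (p + j) := by rw [pow_add]; ring
  have h2 : (a + 1) * 2 ^ (p + j) = a * 2 ^ (p + j) + 2 ^ (p + j) := by
    rw [Nat.add_mul]; omega
  omega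

theorem pv_decomp : ∀ s : Nat, 0 < s →
    ∃ a j p : Nat, a % 2 = 0 ∧ 1 ≤ j ∧ s = a * 2 ^ (p + j) + (2 ^ j - 1) * 2 ^ p := by
  intro s
  induction s using Nat.strong_induction_on with
  | _ s ih =>
    intro hs
    rcases Nat.mod_two_eq_zero_or_one s with he | ho
    · obtain ⟨s', rfl⟩ : ∃ s', s = 2 * s' := ⟨s / 2, by omega⟩
      obtain ⟨a, j, p, ha, hj, heq⟩ := ih s' (by omega) (by omega)
      exact ⟨a, j, p + 1, ha, hj, by
        rw [heq]
        have e1 : 2 ^ (p + 1 + j) = 2 * 2 ^ (p + j) := by rw [show p+1+j = 1+(p+j) by omega, pow_add]; ring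
        have e2 : 2 ^ (p + 1) = 2 * 2 ^ p := by rw [pow_add]; ring
        rw [e1, e2]; ring⟩
    · by_cases h4 : s % 4 = 1
      · refine ⟨2 * (s / 4), 1, 0, by omega, le_refl 1, by norm_num; omega⟩
      · have h3 : s % 4 = 3 := by omega
        obtain ⟨u, rfl⟩ : ∃ u, s = 2 * u + 1 := ⟨s / 2, by omega⟩
        have hu : u % 2 = 1 := by omega
        obtain ⟨a, j, p, ha, hj, heq⟩ := ih u (by omega) (by omega)
        have hp0 : p = 0 := by
          by_contra hne
          have e2 : 2 ^ p % 2 = 0 := by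
            rw [show p = 1 + (p - 1) by omega, pow_add]; simp [Nat.mul_mod_right]
          have e1 : 2 ^ (p + j) % 2 = 0 := by
            rw [show p + j = 1 + (p - 1 + j) by omega, pow_add]; simp [Nat.mul_mod_right]
          have f1 : a * 2 ^ (p + j) % 2 = 0 := by rw [Nat.mul_mod, e1]; simp
          have f2 : (2 ^ j - 1) * 2 ^ p % 2 = 0 := by rw [Nat.mul_mod, e2]; simp
          omega
        subst hp0
        refine ⟨a, j + 1, 0, ha, by omega, ?_⟩
        simp only [Nat.zero_add, pow_zero, Nat.mul_one] at heq ⊢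
        have e3 : 2 ^ (j + 1) = 2 * 2 ^ j := by ring
        have e4 : a * 2 ^ (j + 1) = 2 * (a * 2 ^ j) := by ring
        have h1 : 1 ≤ 2 ^ j := Nat.one_le_two_pow
        omega

theorem pv_bc_state (a j p : Nat) (_hj : 1 ≤ j) :
    PySem.Int.bitCount ((a * 2 ^ (p + j) + (2 ^ j - 1) * 2 ^ p : Nat) : Int) =
      PySem.Int.bitCount (a : Int) + j := by
  have hb : (2 ^ j - 1) * 2 ^ p < 2 ^ (p + j) := by
    have hp : 0 < 2 ^ p := pow_pos (by norm_num) _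
    have h2 : 2 ^ j - 1 < 2 ^ j := by have : 1 ≤ 2 ^ j := Nat.one_le_two_pow; omega
    calc (2 ^ j - 1) * 2 ^ p < 2 ^ j * 2 ^ p := (Nat.mul_lt_mul_right hp).mpr h2
      _ = 2 ^ (p + j) := by rw [pow_add]; ring
  rw [pv_bitCount_mul_pow_add _ _ _ hb]
  congr 1
  have : (2 ^ j - 1) * 2 ^ p = (2 ^ j - 1) * 2 ^ p + 0 := by omega
  rw [this, pv_bitCount_mul_pow_add p _ 0 (pow_pos (by norm_num) _),
      pv_bitCount_pow_sub_one]
  simp [PySem.Int.bitCount_zero]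

theorem pv_bc_next (a j p : Nat) (ha : a % 2 = 0) (hj : 1 ≤ j) :
    PySem.Int.bitCount (((a + 1) * 2 ^ (p + j) + (2 ^ (j - 1) - 1) : Nat) : Int) =
      PySem.Int.bitCount (a : Int) + j := by
  have hb : 2 ^ (j - 1) - 1 < 2 ^ (p + j) := by
    have : 2 ^ (j - 1) ≤ 2 ^ (p + j) := Nat.pow_le_pow_right (by omega) (by omega)
    have h1 : 1 ≤ 2 ^ (j - 1) := Nat.one_le_two_pow
    omega
  rw [pv_bitCount_mul_pow_add _ _ _ hb, pv_bitCount_pow_sub_one, pv_bc_succ_even a ha]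
  omega

-- no integer strictly between a Gosper state and its successor has the same popcount
theorem pv_gosper_next (a j p : Nat) (ha : a % 2 = 0) (hj : 1 ≤ j) (m : Nat)
    (h1 : a * 2 ^ (p + j) + (2 ^ j - 1) * 2 ^ p < m)
    (h2 : m < (a + 1) * 2 ^ (p + j) + (2 ^ (j - 1) - 1)) :
    PySem.Int.bitCount ((m : Nat) : Int) ≠ PySem.Int.bitCount (a : Int) + j := by
  intro hbc
  have hA1 : (a + 1) * 2 ^ (p + j) = a * 2 ^ (p + j) + 2 ^ (p + j) := by ring
  by_cases hm : m < (a + 1) * 2 ^ (p + j)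
  · -- m = a·2^(p+j) + r with (2^j−1)·2^p < r < 2^(p+j)
    obtain ⟨r, hr⟩ : ∃ r, m = a * 2 ^ (p + j) + r := ⟨m - a * 2 ^ (p + j), by omega⟩
    have hrhi : r < 2 ^ (p + j) := by omega
    have hrlo : (2 ^ j - 1) * 2 ^ p < r := by omega
    rw [hr, pv_bitCount_mul_pow_add _ _ _ hrhi] at hbc
    have hbr : PySem.Int.bitCount ((r : Nat) : Int) = j := by omega
    have := (pv_bc_max (p + j) r hrhi).2
    rw [hbr, show p + j - j = p from by omega] at this
    omega
  · -- m = (a+1)·2^(p+j) + r with r < 2^(j−1) − 1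
    obtain ⟨r, hr⟩ : ∃ r, m = (a + 1) * 2 ^ (p + j) + r := ⟨m - (a + 1) * 2 ^ (p + j), by omega⟩
    have hrsm : r < 2 ^ (j - 1) - 1 := by omega
    have hpow : 2 ^ (j - 1) ≤ 2 ^ (p + j) := Nat.pow_le_pow_right (by omega) (by omega)
    have hrhi : r < 2 ^ (p + j) := by omega
    rw [hr, pv_bitCount_mul_pow_add _ _ _ hrhi, pv_bc_succ_even a ha] at hbc
    have hbr : PySem.Int.bitCount ((r : Nat) : Int) = j - 1 := by omega
    have := pv_bc_min r
    rw [hbr] at this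
    omega

theorem pv_loopA_ge (size limit s : Int) (h : ¬ s < limit) : loopA size limit s = [] := by
  rw [loopA]; simp [h]

theorem pv_band_one (m : Nat) : PySem.Int.band ((m : Nat) : Int) 1 = ((m % 2 : Nat) : Int) := by
  have : ((1 : Nat) : Int) = (1 : Int) := by norm_num
  rw [← this, PySem.Int.band_natCast]
  congr 1
  exact Nat.and_one_is_mod m

-- A's walk from any positive state of popcount k is the canonical list from that state
theorem pv_walk (k : Nat) : ∀ N : Nat, ∀ limit s : Nat, 0 < s →
    PySem.Int.bitCount ((s : Nat) : Int) = k → limit - s ≤ N →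
    loopA (k : Int) (limit : Int) (s : Int) = canonF k s limit := by
  intro N
  induction N with
  | zero =>
    intro limit s hs hbc hd
    rw [pv_loopA_ge _ _ _ (by exact_mod_cast Nat.not_lt.2 (by omega : limit ≤ s)),
        canon_nil k s limit (by omega)]
  | succ N ih =>
    intro limit s hs hbc hd
    by_cases hlt : s < limit
    · obtain ⟨a, j, p, ha, hj, hdec⟩ := pv_decomp s hs
      have hstep := pv_gstepA a j p ha hj
      rw [← hdec] at hstep
      have hmono : s < (a + 1) * 2 ^ (p + j) + (2 ^ (j - 1) - 1) := by
        have := pv_lt_gstep a j p hj; omega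
      have hbcs : PySem.Int.bitCount ((s : Nat) : Int) = PySem.Int.bitCount (a : Int) + j := by
        rw [hdec]; exact pv_bc_state a j p hj
      have hbcnext : PySem.Int.bitCount ((((a + 1) * 2 ^ (p + j) + (2 ^ (j - 1) - 1) : Nat)) : Int) = k := by
        rw [pv_bc_next a j p ha hj]; omega
      have hfail : ∀ m, s + 1 ≤ m → m < (a + 1) * 2 ^ (p + j) + (2 ^ (j - 1) - 1) →
          PySem.Int.bitCount ((m : Nat) : Int) ≠ k := by
        intro m hm1 hm2 hc
        exact pv_gosper_next a j p ha hj m (by omega) hm2 (by omega)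
      rw [canon_cons k s limit hlt,
          canon_skip k ((a + 1) * 2 ^ (p + j) + (2 ^ (j - 1) - 1) - (s + 1)) (s + 1) limit
            ((a + 1) * 2 ^ (p + j) + (2 ^ (j - 1) - 1)) (by omega) (by omega) hfail,
          ← ih limit ((a + 1) * 2 ^ (p + j) + (2 ^ (j - 1) - 1)) (by omega) hbcnext (by omega)]
      rw [loopA, dif_pos (by exact_mod_cast hlt : ((s : Nat) : Int) < ((limit : Nat) : Int)), hstep,
          dif_pos (by exact_mod_cast hmono)]
      congr 1
      have hband := pv_band_one s
      by_cases hev : s % 2 = 0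
      · rw [if_pos ⟨by exact_mod_cast hbc, by rw [hband, hev]; simp⟩, if_pos ⟨hbc, hev⟩]
      · rw [if_neg (by
            rintro ⟨-, hb⟩
            rw [hband] at hb
            have : s % 2 = 0 := by exact_mod_cast hb
            exact hev this),
          if_neg (by rintro ⟨-, hb⟩; exact hev hb)]
    · rw [pv_loopA_ge _ _ _ (by exact_mod_cast Nat.not_lt.2 (by omega : limit ≤ s)),
          canon_nil k s limit (by omega)]

-- ---- B-side: colex recursion = canonical list ----
theorem pv_shl_one (k : Nat) : ((1 : Int) <<< k) = ((2 ^ k : Nat) : Int) := by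
  simp [Int.shiftLeft_eq]

theorem pv_canon_zero (X : Nat) (hX : 1 ≤ X) : canonF 0 0 X = [(0 : Int)] := by
  rw [canon_cons 0 0 X (by omega), if_pos (by simp [PySem.Int.bitCount_zero])]
  rw [canon_skip 0 X 1 X X (by omega) (by omega)
      (fun m hm1 hm2 hbc => by have := pv_bc_eq_zero m hbc; omega),
      canon_nil 0 X X (by omega)]
  simp

theorem colexB_pos (top k : Int) (hk : ¬ k = 0) : colexB top k =
    (PySem.List.pyRange k (top + 1) 1).flatMap (fun hi =>
      if _h : (k - 1).toNat < k.toNat then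
        (colexB (hi - 1) (k - 1)).map (fun rest => PySem.Int.bor rest ((1 : Int) <<< hi.toNat))
      else []) := by
  rw [colexB, if_neg hk]

theorem pv_colex_succ (T k : Nat) (hk : 1 ≤ k) :
    colexB ((T + 1 : Nat) : Int) (k : Int) =
      colexB ((T : Nat) : Int) (k : Int) ++
        (colexB ((T : Nat) : Int) (((k - 1 : Nat) : Nat) : Int)).map
          (fun r => PySem.Int.bor r ((1 : Int) <<< (T + 1))) := by
  have hk0 : ¬ ((k : Nat) : Int) = 0 := by exact_mod_cast (by omega : ¬ k = 0)
  have hguard : (((k : Nat) : Int) - 1).toNat < ((k : Nat) : Int).toNat := by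
    rw [show ((k : Nat) : Int) - 1 = ((k - 1 : Nat) : Int) from by push_cast [hk]; ring]
    simp; omega
  rw [colexB_pos _ _ hk0, colexB_pos _ _ hk0]
  by_cases hT : ((k : Nat) : Int) ≤ ((T : Nat) : Int) + 1
  · rw [show (((T + 1 : Nat) : Int) + 1) = (((T : Nat) : Int) + 1) + 1 from by push_cast; ring,
        PySem.List.pyRange_one_append ((k : Nat) : Int) (((T : Nat) : Int) + 1)
          ((((T : Nat) : Int) + 1) + 1) hT (by omega),
        List.flatMap_append]
    congr 1
    rw [PySem.List.pyRange_one_singleton]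
    simp only [List.flatMap_cons, List.flatMap_nil, List.append_nil]
    rw [dif_pos hguard,
        show ((T : Nat) : Int) + 1 - 1 = ((T : Nat) : Int) from by ring,
        show ((k : Nat) : Int) - 1 = ((k - 1 : Nat) : Int) from by push_cast [hk]; ring,
        show (((T : Nat) : Int) + 1).toNat = T + 1 from by omega]
  · have hT' : (T : Int) + 2 ≤ (k : Int) := by push_cast at hT ⊢; omega
    rw [PySem.List.pyRange_one_eq_nil (by omega),
        PySem.List.pyRange_one_eq_nil (by omega)]
    have hk1 : 1 ≤ k - 1 := by
      rcases Nat.eq_or_lt_of_le hk with h | h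
      · exfalso; omega
      · omega
    rw [colexB_pos _ _ (by exact_mod_cast (by omega : ¬ k - 1 = 0)),
        PySem.List.pyRange_one_eq_nil (by omega)]
    simp

theorem pv_canon_shift (P : Nat) (hP : 1 ≤ P) (k : Nat) (hk : 1 ≤ k) :
    ∀ d r, 2 ^ P - r ≤ d → r ≤ 2 ^ P →
    canonF k (2 ^ P + r) (2 ^ (P + 1)) =
      (canonF (k - 1) r (2 ^ P)).map (fun m => m + ((2 ^ P : Nat) : Int)) := by
  have e2 : 2 ^ (P + 1) = 2 * 2 ^ P := by ring
  intro d
  induction d with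
  | zero =>
    intro r h1 h2
    have hr : r = 2 ^ P := by omega
    subst hr
    rw [canon_nil _ _ _ (by omega), canon_nil _ _ _ (by omega)]
    simp
  | succ d ih =>
    intro r h1 h2
    rcases Nat.eq_or_lt_of_le h2 with heq | hlt
    · subst heq
      rw [canon_nil _ _ _ (by omega), canon_nil _ _ _ (by omega)]
      simp
    · rw [canon_cons k (2 ^ P + r) (2 ^ (P + 1)) (by omega),
          canon_cons (k - 1) r (2 ^ P) hlt, List.map_append]
      have hbc : PySem.Int.bitCount ((2 ^ P + r : Nat) : Int)
          = 1 + PySem.Int.bitCount ((r : Nat) : Int) := by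
        have h := pv_bitCount_mul_pow_add P 1 r hlt
        rw [show 1 * 2 ^ P + r = 2 ^ P + r from by ring] at h
        rw [h, show PySem.Int.bitCount ((1 : Nat) : Int) = 1 from by decide]
      have hpar : (2 ^ P + r) % 2 = r % 2 := by
        have : 2 ^ P % 2 = 0 := by
          rw [show P = 1 + (P - 1) from by omega, pow_add]; simp [Nat.mul_mod_right]
        omega
      congr 1
      · by_cases hcond : PySem.Int.bitCount ((r : Nat) : Int) = k - 1 ∧ r % 2 = 0
        · rw [if_pos ⟨by rw [hbc, hcond.1]; omega, by rw [hpar]; exact hcond.2⟩, if_pos hcond]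
          simp only [List.map_cons, List.map_nil]
          congr 1
          push_cast; ring
        · rw [if_neg (fun h => hcond ⟨by have := h.1; rw [hbc] at this; omega,
              by have := h.2; rwa [hpar] at this⟩), if_neg hcond]
          simp
      · rw [show 2 ^ P + r + 1 = 2 ^ P + (r + 1) from by omega]
        exact ih (r + 1) (by omega) (by omega)

theorem pv_colex (T : Nat) : ∀ k : Nat, colexB ((T : Nat) : Int) (k : Int) = canonF k 0 (2 ^ (T + 1)) := by
  induction T with
  | zero =>
    intro k
    rcases Nat.eq_zero_or_pos k with hk | hk
    · subst hk
      rw [show ((0 : Nat) : Int) = 0 from rfl, colexB, if_pos rfl,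
          show (2 : Nat) ^ (0 + 1) = 2 from by norm_num, pv_canon_zero 2 (by omega)]
    · rw [colexB_pos _ _ (by exact_mod_cast (by omega : ¬ k = 0)),
          PySem.List.pyRange_one_eq_nil (by push_cast; omega),
          show (2 : Nat) ^ (0 + 1) = 2 from by norm_num,
          canon_cons k 0 2 (by omega),
          if_neg (by
            rintro ⟨h, -⟩
            rw [show ((0 : Nat) : Int) = 0 from rfl, PySem.Int.bitCount_zero] at h
            omega),
          canon_cons k 1 2 (by omega), if_neg (by rintro ⟨-, h⟩; omega),
          canon_nil k 2 2 (by omega)]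
      simp
  | succ T ih =>
    intro k
    rcases Nat.eq_zero_or_pos k with hk | hk
    · subst hk
      rw [show ((0 : Nat) : Int) = 0 from rfl, colexB, if_pos rfl,
          pv_canon_zero (2 ^ (T + 1 + 1)) Nat.one_le_two_pow]
    · have hsplit := canon_split k (2 ^ (T + 1)) 0 (2 ^ (T + 1)) (2 ^ (T + 1 + 1))
        (Nat.sub_le _ _) (Nat.zero_le _)
        (Nat.pow_le_pow_right (by norm_num) (Nat.le_succ _))
      rw [pv_colex_succ T k hk, ih k, ih (k - 1), hsplit]
      congr 1
      have hshift := pv_canon_shift (T + 1) (Nat.le_add_left _ _) k hk (2 ^ (T + 1)) 0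
        (Nat.sub_le _ _) (Nat.zero_le _)
      rw [show 2 ^ (T + 1) + 0 = 2 ^ (T + 1) from by omega] at hshift
      rw [hshift]
      apply List.map_congr_left
      intro x hx
      obtain ⟨t, rfl, -, ht⟩ := canon_mem (k - 1) (2 ^ (T + 1)) 0 (2 ^ (T + 1)) (Nat.sub_le _ _) x hx
      rw [pv_shl_one (T + 1), PySem.Int.bor_natCast,
          show t ||| 2 ^ (T + 1) = 2 ^ (T + 1) + t from by
            have := pv_or t 1 (T + 1) ht; simpa using this]
      push_cast; ring

-- ===== VERDICT (by name: the statement is the Claim_ definition above) =====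
theorem generar_subconjuntos_spec : Claim_equal_generar_subconjuntos := by
  intro n size _dom hpre
  obtain ⟨hn, hs⟩ := hpre
  obtain ⟨m, rfl⟩ : ∃ m : Nat, n = (m : Int) := ⟨n.toNat, by omega⟩
  obtain ⟨k, rfl⟩ : ∃ k : Nat, size = (k : Int) := ⟨size.toNat, by omega⟩
  have hk1 : 1 ≤ k := by exact_mod_cast hs
  have h1 : 1 ≤ 2 ^ k := Nat.one_le_two_pow
  have h2k : 2 ≤ 2 ^ k := by
    calc (2 : Nat) = 2 ^ 1 := by norm_num
      _ ≤ 2 ^ k := Nat.pow_le_pow_right (by norm_num) hk1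
  unfold Spec_generar_subconjuntos generar_subconjuntos generar_subconjuntos_alt
  simp only [Int.toNat_natCast]
  rw [show ((1 : Int) <<< k) - 1 = ((2 ^ k - 1 : Nat) : Int) from by
        rw [pv_shl_one, Nat.cast_sub h1, Nat.cast_one],
      pv_shl_one m]
  cases m with
  | zero =>
    rw [pv_loopA_ge _ _ _ (by push_cast; omega),
        colexB_pos _ _ (by exact_mod_cast (by omega : ¬ k = 0)),
        PySem.List.pyRange_one_eq_nil (by push_cast; omega)]
    simp
  | succ M =>
    rw [show ((M + 1 : Nat) : Int) - 1 = ((M : Nat) : Int) from by push_cast; ring,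
        pv_colex M k,
        canon_skip k (2 ^ k - 1) 0 (2 ^ (M + 1)) (2 ^ k - 1) (by omega) (by omega)
          (fun m' _ hm' hbc => by have := pv_bc_min m'; rw [hbc] at this; omega)]
    by_cases hcase : 2 ^ k - 1 < 2 ^ (M + 1)
    · exact pv_walk k (2 ^ (M + 1)) (2 ^ (M + 1)) (2 ^ k - 1) (by omega)
        (pv_bitCount_pow_sub_one k) (Nat.sub_le _ _)
    · rw [pv_loopA_ge _ _ _ (by exact_mod_cast Nat.not_lt.2 (by omega)),
          canon_nil k (2 ^ k - 1) (2 ^ (M + 1)) hcase]
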